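-- pv_equiv track=rewrite | github.com/dimnikolos/algebPy | py/zigisi.py | zygisi
-- ===== SOURCE A (Python) =====
-- def zygisi(barosKila,barosg,stathmaseg):
--     baros = barosKila * 1000 + barosg
--     stathmos = 0
--     res = [0]*len(stathmaseg)
--     s = list(stathmaseg)
--     while baros>=min(s):
--         if baros >= max(s):
--             res[stathmaseg.index(max(s))]=baros//max(s)
--             baros = baros % max(s)
--         s.pop(s.index(max(s)))
--         if not s:
--             break
--     return(res)
-- ===== SOURCE B (Python) =====
-- def zygisi(barosKila, barosg, stathmaseg):
--     baros = barosKila * 1000 + barosg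
--     res = [0] * len(stathmaseg)
--     for i, w in sorted(enumerate(stathmaseg), key=lambda p: p[1], reverse=True):
--         if baros >= w:
--             res[i] = baros // w
--             baros %= w
--     return res
-- ===== Notes on version B (the rewrite author's own statement) =====
-- stated objective: faster
-- what changed: B replaces A's while-loop that rescans a shrinking copy with min/max/index/pop on every iteration by one stable descending sort of (index, weight) pairs followed by a single greedy pass.
-- outside the precondition, e.g. on zygisi(0, 3, [-2, -2]): A returns [0, 0], B returns [-2, 0]
import Mathlib
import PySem

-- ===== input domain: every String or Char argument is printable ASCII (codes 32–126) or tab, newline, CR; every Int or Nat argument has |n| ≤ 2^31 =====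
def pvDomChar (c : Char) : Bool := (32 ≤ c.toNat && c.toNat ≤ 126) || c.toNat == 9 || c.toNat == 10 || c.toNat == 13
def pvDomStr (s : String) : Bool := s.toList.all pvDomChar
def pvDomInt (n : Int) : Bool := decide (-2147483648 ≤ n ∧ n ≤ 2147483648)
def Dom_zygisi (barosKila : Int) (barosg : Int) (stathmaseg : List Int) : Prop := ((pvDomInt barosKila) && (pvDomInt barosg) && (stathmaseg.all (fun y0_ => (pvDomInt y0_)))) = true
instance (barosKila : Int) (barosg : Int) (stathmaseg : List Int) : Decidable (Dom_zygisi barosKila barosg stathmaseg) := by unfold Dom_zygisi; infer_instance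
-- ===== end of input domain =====

-- B sorts the (index, weight) pairs descending once and does a single greedy pass, instead of
-- A's while-loop that rescans a shrinking copy with min/max/index/pop on every iteration.

-- ===== PORT A =====
-- A's while loop as fuel recursion; fuel = s.length bounds the iteration count (each iteration pops one element).
def zygisiLoop (stathmaseg : List Int) : Nat → Int → List Int → List Int → List Int
  | 0, _, _, res => res
  | fuel+1, baros, s, res =>
    match PySem.List.min? s (fun x => x) with
    | none => res   -- min([]) raises ValueError in Python; outside Pre_
    | some mn =>
      if baros ≥ mn then
        match PySem.List.max? s (fun x => x) with
        | none => res  -- unreachable: s ≠ [] here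
        | some mx =>
          let res' := if baros ≥ mx then
              (match PySem.List.index? stathmaseg mx with
               | some i => res.set i (PySem.Int.floordiv baros mx)
               | none => res)  -- .index cannot fail: mx ∈ s ⊆ stathmaseg
            else res
          let baros' := if baros ≥ mx then PySem.Int.mod baros mx else baros
          let s' := (PySem.List.remove? s mx).getD []   -- s.pop(s.index(max(s))) removes the first max
          if s' = [] then res' else zygisiLoop stathmaseg fuel baros' s' res'
      else res

def zygisi (barosKila : Int) (barosg : Int) (stathmaseg : List Int) : List Int :=
  zygisiLoop stathmaseg stathmaseg.length (barosKila * 1000 + barosg) stathmaseg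
    (List.replicate stathmaseg.length 0)

-- ===== PORT B =====
def zygisi_alt (barosKila : Int) (barosg : Int) (stathmaseg : List Int) : List Int :=
  let baros := barosKila * 1000 + barosg
  let res := List.replicate stathmaseg.length 0
  ((PySem.List.sorted (PySem.List.enumerate stathmaseg 0) (fun p => p.2) true).foldl
    (fun st p =>
      if st.1 ≥ p.2 then
        (PySem.Int.mod st.1 p.2, st.2.set p.1.toNat (PySem.Int.floordiv st.1 p.2))
      else st)
    (baros, res)).2

-- ===== PRECONDITION & SPEC =====
-- Pre_ excludes: the empty list and lists holding a 0 weight together with a nonnegative total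
-- (exactly the inputs where A raises ValueError resp. ZeroDivisionError); and duplicated negative
-- weights that the greedy can reach (total not below every weight), a corner no caller would
-- specify, where A's floor-mod loop revisits the duplicate and overwrites the quotient stored at
-- its first index while B fills each occurrence's own slot.
def Pre_zygisi (barosKila : Int) (barosg : Int) (stathmaseg : List Int) : Prop :=
  stathmaseg ≠ [] ∧ (0 ∈ stathmaseg → barosKila * 1000 + barosg < 0) ∧
    ((stathmaseg.filter (fun w => decide (w < 0))).Nodup ∨ ∀ w ∈ stathmaseg, barosKila * 1000 + barosg < w)
instance (barosKila : Int) (barosg : Int) (stathmaseg : List Int) : Decidable (Pre_zygisi barosKila barosg stathmaseg) := by unfold Pre_zygisi; infer_instance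

def pvWitness_zygisi : Int × Int × List Int := (1, 500, [1000, 500, 100])

def Spec_zygisi (barosKila : Int) (barosg : Int) (stathmaseg : List Int) (out : List Int) : Prop := out = zygisi_alt barosKila barosg stathmaseg
instance (barosKila : Int) (barosg : Int) (stathmaseg : List Int) (out : List Int) : Decidable (Spec_zygisi barosKila barosg stathmaseg out) := by unfold Spec_zygisi; infer_instance

-- ===== CLAIM (what is proved, stated in full; the proofs are below) =====
def Claim_equal_zygisi : Prop := ∀ (barosKila : Int) (barosg : Int) (stathmaseg : List Int), Dom_zygisi barosKila barosg stathmaseg → Pre_zygisi barosKila barosg stathmaseg → Spec_zygisi barosKila barosg stathmaseg (zygisi barosKila barosg stathmaseg)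

-- ===== LEMMAS AND PROOFS =====

-- The common greedy step, seen from A's side (writes at the weight's first index in stathmaseg).
def stepA (s0 : List Int) (st : Int × List Int) (w : Int) : Int × List Int :=
  if st.1 ≥ w then
    (PySem.Int.mod st.1 w, st.2.set ((PySem.List.index? s0 w).getD 0) (PySem.Int.floordiv st.1 w))
  else st

-- The greedy step of B (writes at the pair's own index).
def stepB (st : Int × List Int) (p : Int × Int) : Int × List Int :=
  if st.1 ≥ p.2 then
    (PySem.Int.mod st.1 p.2, st.2.set p.1.toNat (PySem.Int.floordiv st.1 p.2))
  else st

-- Strict order realised by the stable descending sort of enumerate: weight desc, ties by index asc.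
def PP (a b : Int × Int) : Prop := b.2 < a.2 ∨ (a.2 = b.2 ∧ a.1 < b.1)

theorem PP_snd_le {a b : Int × Int} (h : PP a b) : b.2 ≤ a.2 := by
  rcases h with h | ⟨h, _⟩ <;> omega

theorem stepA_noop (s0 : List Int) (l : List Int) (st : Int × List Int)
    (h : ∀ w ∈ l, st.1 < w) : l.foldl (stepA s0) st = st := by
  induction l with
  | nil => rfl
  | cons w t ih =>
    have hw : ¬ st.1 ≥ w := not_le.mpr (h w (by simp))
    simp only [List.foldl_cons, stepA, if_neg hw]
    exact ih (fun x hx => h x (by simp [hx]))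

theorem stepB_noop (l : List (Int × Int)) (st : Int × List Int)
    (h : ∀ p ∈ l, st.1 < p.2) : l.foldl stepB st = st := by
  induction l with
  | nil => rfl
  | cons p t ih =>
    have hp : ¬ st.1 ≥ p.2 := not_le.mpr (h p (by simp))
    simp only [List.foldl_cons, stepB, if_neg hp]
    exact ih (fun x hx => h x (by simp [hx]))

-- The descending sort starts with the max; the first max popped, the rest is the sort of the remainder.
theorem sortedDesc_cons (s : List Int) (m : Int)
    (hm : PySem.List.max? s (fun x => x) = some m) :
    PySem.List.sorted s (fun x => x) true = m :: PySem.List.sorted (s.erase m) (fun x => x) true := by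
  have hmem : m ∈ s := PySem.List.max?_mem hm
  apply List.eq_of_perm_of_sorted (le := fun a b : Int => b ≤ a)
  · exact fun a b _ _ h1 h2 => le_antisymm h2 h1
  · exact PySem.List.sorted_pairwise_rev s _
  · refine List.Pairwise.cons ?_ (PySem.List.sorted_pairwise_rev _ _)
    intro x hx
    have : x ∈ s := List.mem_of_mem_erase ((PySem.List.mem_sorted _ _ _ _).mp hx)
    exact PySem.List.max?_isMax hm x this
  · exact (PySem.List.sorted_perm s _ true).trans
      ((List.perm_cons_erase hmem).trans ((PySem.List.sorted_perm (s.erase m) _ true).symm.cons m))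

-- A's while loop is the greedy fold over the weights in descending order.
theorem loop_eq_fold (s0 : List Int) :
    ∀ (n : Nat) (s : List Int) (b : Int) (r : List Int) (fuel : Nat),
      s.length ≤ n → s ≠ [] → s.length ≤ fuel → (∀ w ∈ s, w ∈ s0) →
      zygisiLoop s0 fuel b s r = ((PySem.List.sorted s (fun x => x) true).foldl (stepA s0) (b, r)).2 := by
  intro n
  induction n with
  | zero =>
    intro s b r fuel hn hne _ _
    exact absurd (List.length_eq_zero_iff.mp (Nat.le_zero.mp hn)) hne
  | succ n ih =>
    intro s b r fuel hn hne hfuel hsub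
    obtain ⟨fuel, rfl⟩ : ∃ f, fuel = f + 1 := by
      cases fuel
      · exact absurd (List.length_eq_zero_iff.mp (Nat.le_zero.mp hfuel)) hne
      · exact ⟨_, rfl⟩
    obtain ⟨mn, hmn⟩ : ∃ mn, PySem.List.min? s (fun x => x) = some mn := by
      cases h : PySem.List.min? s (fun x => x)
      · exact absurd ((PySem.List.min?_eq_none_iff s _).mp h) hne
      · exact ⟨_, rfl⟩
    obtain ⟨mx, hmx⟩ : ∃ mx, PySem.List.max? s (fun x => x) = some mx := by
      cases h : PySem.List.max? s (fun x => x)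
      · exact absurd ((PySem.List.max?_eq_none_iff s _).mp h) hne
      · exact ⟨_, rfl⟩
    have hmxs : mx ∈ s := PySem.List.max?_mem hmx
    have hrem : (PySem.List.remove? s mx).getD [] = s.erase mx := by
      rw [PySem.List.remove?_eq_some_erase s mx hmxs]; rfl
    by_cases hb : b ≥ mn
    · -- loop body runs
      rw [sortedDesc_cons s mx hmx]
      simp only [zygisiLoop, hmn, if_pos hb, hmx, hrem, List.foldl_cons]
      have hstep : stepA s0 (b, r) mx =
          (if b ≥ mx then PySem.Int.mod b mx else b,
           if b ≥ mx then
             (match PySem.List.index? s0 mx with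
              | some i => r.set i (PySem.Int.floordiv b mx)
              | none => r)
           else r) := by
        by_cases hbx : b ≥ mx
        · obtain ⟨i, hi⟩ : ∃ i, PySem.List.index? s0 mx = some i := by
            cases h : PySem.List.index? s0 mx
            · have := (PySem.List.index?_isSome_iff s0 mx).mpr (hsub mx hmxs)
              rw [h] at this; simp at this
            · exact ⟨_, rfl⟩
          simp only [stepA, if_pos hbx, hi, Option.getD_some]
        · simp only [stepA, if_neg hbx]
      rw [hstep]
      by_cases hnil : s.erase mx = []
      · rw [if_pos hnil, hnil]
        simp [PySem.List.sorted]
      · rw [if_neg hnil]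
        have hlen : (s.erase mx).length = s.length - 1 := List.length_erase_of_mem hmxs
        have hlen1 : 1 ≤ s.length := List.length_pos_iff.mpr hne
        exact ih (s.erase mx) _ _ fuel (by omega) hnil (by omega)
          (fun w hw => hsub w (List.mem_of_mem_erase hw))
    · -- while condition false: loop exits; every remaining step of the fold is a no-op
      simp only [zygisiLoop, hmn, if_neg hb]
      rw [stepA_noop]
      intro w hw
      have hws : w ∈ s := (PySem.List.mem_sorted _ _ _ _).mp hw
      have := PySem.List.min?_isMin hmn w hws
      simp only [not_le] at hb
      omega

theorem insertBy_pairwise_PP (x : Int × Int) : ∀ (acc : List (Int × Int)),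
    acc.Pairwise PP → (∀ a ∈ acc, a.1 < x.1) →
    (PySem.List.insertBy (fun a b => decide (b.2 < a.2)) x acc).Pairwise PP := by
  intro acc
  induction acc with
  | nil => intro _ _; simp [PySem.List.insertBy]
  | cons y ys ih =>
    intro hp hlt
    rw [PySem.List.insertBy.eq_2]
    split
    · rename_i hb
      have hyx : y.2 < x.2 := by simpa using hb
      refine List.Pairwise.cons ?_ hp
      intro z hz
      rcases List.mem_cons.mp hz with rfl | hz
      · exact Or.inl hyx
      · have : z.2 ≤ y.2 := PP_snd_le (List.rel_of_pairwise_cons hp hz)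
        exact Or.inl (by omega)
    · rename_i hb
      have hxy : x.2 ≤ y.2 := by simpa using hb
      refine List.Pairwise.cons ?_ (ih (List.Pairwise.of_cons hp) (fun a ha => hlt a (by simp [ha])))
      intro z hz
      rcases (PySem.List.insertBy_mem_iff _ _ _ _).mp hz with rfl | hz
      · rcases lt_or_eq_of_le hxy with h | h
        · exact Or.inl h
        · exact Or.inr ⟨h.symm, hlt y (by simp)⟩
      · exact List.rel_of_pairwise_cons hp hz

theorem foldl_insertBy_pairwise_PP :
    ∀ (l acc : List (Int × Int)), acc.Pairwise PP → l.Pairwise (fun a b => a.1 < b.1) →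
      (∀ a ∈ acc, ∀ x ∈ l, a.1 < x.1) →
      (l.foldl (fun acc x => PySem.List.insertBy (fun a b => decide (b.2 < a.2)) x acc) acc).Pairwise PP := by
  intro l
  induction l with
  | nil => intro acc hp _ _; exact hp
  | cons x t ih =>
    intro acc hp hl hlt
    simp only [List.foldl_cons]
    refine ih _ (insertBy_pairwise_PP x acc hp (fun a ha => hlt a ha x (by simp))) (List.Pairwise.of_cons hl) ?_
    intro a ha y hy
    rcases (PySem.List.insertBy_mem_iff _ _ _ _).mp ha with rfl | ha
    · exact List.rel_of_pairwise_cons hl hy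
    · exact hlt a ha y (by simp [hy])

-- Stability of the sort on enumerate: weights descending, equal weights by ascending original index.
theorem q_pairwise_PP (s0 : List Int) :
    (PySem.List.sorted (PySem.List.enumerate s0 0) (fun p => p.2) true).Pairwise PP := by
  rw [PySem.List.sorted_rev_eq_foldl_insertBy]
  exact foldl_insertBy_pairwise_PP _ [] List.Pairwise.nil (PySem.List.pairwise_lt_enumerate s0 0)
    (by simp)

theorem index?_of_count_le_one :
    ∀ (l : List Int) (i : Nat) (h : i < l.length), List.count l[i] l ≤ 1 →
      PySem.List.index? l l[i] = some i := by
  intro l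
  induction l with
  | nil => intro i h; simp at h
  | cons x t ih =>
    intro i h hc
    cases i with
    | zero => simpa using PySem.List.index?_cons_self (x := x) (xs := t)
    | succ i =>
      have hi : i < t.length := by simpa using h
      have hv : (x :: t)[i+1] = t[i] := by simp
      rw [hv] at hc ⊢
      have hxne : x ≠ t[i] := by
        intro he
        have : t[i] ∈ t := List.getElem_mem hi
        have : 1 ≤ List.count t[i] t := List.count_pos_iff.mpr this
        rw [List.count_cons, if_pos (by simp [he])] at hc
        omega
      rw [PySem.List.index?_cons_of_ne t hxne]
      have hct : List.count t[i] t ≤ 1 := by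
        rw [List.count_cons, if_neg (by simpa using hxne)] at hc
        omega
      rw [ih i hi hct]
      rfl

-- A's fold over the sorted weights equals B's fold over the sorted (index, weight) pairs.
theorem fold_bridge (s0 : List Int) :
    ∀ (q : List (Int × Int)) (b : Int) (r : List Int),
      q.Pairwise PP →
      (∀ p ∈ q, p.2 = 0 → b < 0) →
      (∀ p ∈ q, p.2 < 0 → PySem.List.index? s0 p.2 = some p.1.toNat) →
      (∀ p ∈ q, 0 < p.2 → b ≥ p.2 →
        (PySem.List.index? s0 p.2 = some p.1.toNat ∨ ∃ p' ∈ q, p'.2 = p.2 ∧ p'.1 < p.1)) →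
      (q.map (·.2)).foldl (stepA s0) (b, r) = q.foldl stepB (b, r) := by
  intro q
  induction q with
  | nil => intro b r _ _ _ _; rfl
  | cons p t ih =>
    intro b r hpw hz hu hm
    simp only [List.map_cons, List.foldl_cons]
    by_cases hf : b ≥ p.2
    · -- the step fires on both sides; the written index is the first index of the weight p.2
      have hne : p.2 ≠ 0 := by
        intro h0
        have := hz p (by simp) h0
        omega
      have hidx : PySem.List.index? s0 p.2 = some p.1.toNat := by
        rcases lt_or_gt_of_ne hne with hneg | hpos
        · exact hu p (by simp) hneg
        · rcases hm p (by simp) hpos hf with h | ⟨p', hp', he, hlt⟩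
          · exact h
          · rcases List.mem_cons.mp hp' with rfl | hp'
            · omega
            · rcases List.rel_of_pairwise_cons hpw hp' with h | ⟨_, h⟩ <;> omega
      have hsame : stepA s0 (b, r) p.2 = stepB (b, r) p := by
        simp only [stepA, stepB, if_pos hf, hidx, Option.getD_some]
      rw [hsame]
      have hstB : stepB (b, r) p = (PySem.Int.mod b p.2, r.set p.1.toNat (PySem.Int.floordiv b p.2)) := by
        simp [stepB, if_pos hf]
      rw [hstB]
      refine ih _ _ (List.Pairwise.of_cons hpw) ?_
        (fun x hx h => hu x (by simp [hx]) h) ?_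
      · -- no 0 weight can still be pending after a fire
        intro pt hpt h0
        rcases lt_or_gt_of_ne hne with hneg | hpos
        · have : pt.2 ≤ p.2 := by
            rcases List.rel_of_pairwise_cons hpw hpt with h | ⟨h, _⟩ <;> omega
          omega
        · have := hz pt (by simp [hpt]) h0
          omega
      · intro pt hpt hpos hbt
        have hle : pt.2 ≤ p.2 := by
          rcases List.rel_of_pairwise_cons hpw hpt with h | ⟨h, _⟩ <;> omega
        have hppos : 0 < p.2 := by omega
        have hmodlt : PySem.Int.mod b p.2 < p.2 := PySem.Int.mod_lt b hppos
        have hble : b ≥ pt.2 := by omega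
        rcases hm pt (by simp [hpt]) hpos hble with h | ⟨p', hp', he, hlt⟩
        · exact Or.inl h
        · rcases List.mem_cons.mp hp' with rfl | hp'
          · omega  -- head witness impossible: mod b p.2 < p.2 = pt.2 ≤ mod b p.2
          · exact Or.inr ⟨p', hp', he, hlt⟩
    · -- no fire on either side
      have hsame : stepA s0 (b, r) p.2 = (b, r) := by simp [stepA, if_neg hf]
      have hsB : stepB (b, r) p = (b, r) := by simp [stepB, if_neg hf]
      rw [hsame, hsB]
      refine ih _ _ (List.Pairwise.of_cons hpw) (fun x hx h => hz x (by simp [hx]) h)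
        (fun x hx h => hu x (by simp [hx]) h) ?_
      intro pt hpt hpos hbt
      rcases hm pt (by simp [hpt]) hpos hbt with h | ⟨p', hp', he, hlt⟩
      · exact Or.inl h
      · rcases List.mem_cons.mp hp' with rfl | hp'
        · omega
        · exact Or.inr ⟨p', hp', he, hlt⟩

-- Every element of the sorted pair list is an (index, value) pair of stathmaseg.
theorem q_mem (s0 : List Int) (p : Int × Int)
    (hp : p ∈ PySem.List.sorted (PySem.List.enumerate s0 0) (fun p => p.2) true) :
    ∃ k : Nat, ∃ _ : k < s0.length, p = ((k : Int), s0[k]) := by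
  have := ((PySem.List.sorted_perm (PySem.List.enumerate s0 0) (fun p => p.2) true).mem_iff).mp hp
  rcases (PySem.List.mem_enumerate_iff s0 0 p).mp this with ⟨k, hk, hpe⟩
  exact ⟨k, hk, by simpa using hpe⟩

-- The weights of the sorted pair list, in order, are the weights sorted descending.
theorem sorted_values_eq (s0 : List Int) :
    PySem.List.sorted s0 (fun x => x) true
      = (PySem.List.sorted (PySem.List.enumerate s0 0) (fun p => p.2) true).map (·.2) := by
  apply List.eq_of_perm_of_sorted (le := fun a b : Int => b ≤ a)
  · exact fun a b _ _ h1 h2 => le_antisymm h2 h1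
  · exact PySem.List.sorted_pairwise_rev s0 _
  · exact List.pairwise_map.mpr (PySem.List.sorted_pairwise_rev (PySem.List.enumerate s0 0) (fun p => p.2))
  · refine (PySem.List.sorted_perm s0 _ true).trans ?_
    have h1 : (PySem.List.enumerate s0 0).map (·.2) = s0 := PySem.List.map_snd_enumerate s0 0
    have h2 := ((PySem.List.sorted_perm (PySem.List.enumerate s0 0) (fun p => p.2) true).map (·.2)).symm
    rw [h1] at h2
    exact h2

-- ===== VERDICT (by name: the statement is the Claim_ definition above) =====
theorem zygisi_spec : Claim_equal_zygisi := by
  intro bk bg s0 _ hpre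
  obtain ⟨hne, h0, hdis⟩ := hpre
  show zygisi bk bg s0 = zygisi_alt bk bg s0
  have hA : zygisi bk bg s0 =
      ((PySem.List.sorted s0 (fun x => x) true).foldl (stepA s0)
        (bk * 1000 + bg, List.replicate s0.length 0)).2 :=
    loop_eq_fold s0 s0.length s0 _ _ s0.length le_rfl hne le_rfl (fun _ hw => hw)
  have hB : zygisi_alt bk bg s0 =
      ((PySem.List.sorted (PySem.List.enumerate s0 0) (fun p => p.2) true).foldl stepB
        (bk * 1000 + bg, List.replicate s0.length 0)).2 := rfl
  by_cases hall : ∀ w ∈ s0, bk * 1000 + bg < w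
  · -- the total is below every weight: neither loop ever fires
    rw [hA, hB, stepA_noop s0 _ _ ?_, stepB_noop _ _ ?_]
    · intro p hp
      rcases q_mem s0 p hp with ⟨k, hk, rfl⟩
      exact hall _ (List.getElem_mem hk)
    · intro w hw
      exact hall w ((PySem.List.mem_sorted _ _ _ _).mp hw)
  · have hnd : (s0.filter (fun w => decide (w < 0))).Nodup := hdis.resolve_right hall
    -- establish the invariants for the bridge at the initial state
    have hz0 : ∀ p ∈ PySem.List.sorted (PySem.List.enumerate s0 0) (fun p => p.2) true,
        p.2 = 0 → bk * 1000 + bg < 0 := by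
      intro p hp hz
      rcases q_mem s0 p hp with ⟨k, hk, rfl⟩
      exact h0 (by simp only at hz; rw [← hz]; exact List.getElem_mem hk)
    have hu : ∀ p ∈ PySem.List.sorted (PySem.List.enumerate s0 0) (fun p => p.2) true,
        p.2 < 0 → PySem.List.index? s0 p.2 = some p.1.toNat := by
      intro p hp hneg
      rcases q_mem s0 p hp with ⟨k, hk, rfl⟩
      simp only at hneg ⊢
      have hcf : List.count s0[k] (s0.filter (fun w => decide (w < 0))) = List.count s0[k] s0 :=
        List.count_filter (by simpa using hneg)
      have hc1 : List.count s0[k] s0 ≤ 1 := by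
        have := List.nodup_iff_count_le_one.mp hnd s0[k]
        omega
      simpa using index?_of_count_le_one s0 k hk hc1
    have hm : ∀ p ∈ PySem.List.sorted (PySem.List.enumerate s0 0) (fun p => p.2) true,
        0 < p.2 → (bk * 1000 + bg) ≥ p.2 →
        (PySem.List.index? s0 p.2 = some p.1.toNat ∨
          ∃ p' ∈ PySem.List.sorted (PySem.List.enumerate s0 0) (fun p => p.2) true,
            p'.2 = p.2 ∧ p'.1 < p.1) := by
      intro p hp _ _
      rcases q_mem s0 p hp with ⟨k, hk, rfl⟩
      have hmem : s0[k] ∈ s0 := List.getElem_mem hk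
      obtain ⟨j, hj⟩ : ∃ j, PySem.List.index? s0 s0[k] = some j := by
        cases h : PySem.List.index? s0 s0[k]
        · have := (PySem.List.index?_isSome_iff s0 s0[k]).mpr hmem
          rw [h] at this; simp at this
        · exact ⟨_, rfl⟩
      obtain ⟨hjlen, hjv, hjmin⟩ := PySem.List.getElem_of_index?_eq_some hj
      by_cases hjk : j = k
      · left; rw [hj, hjk]; simp
      · have hjlt : j < k := by
          rcases Nat.lt_or_ge j k with h | h
          · exact h
          · have hkj : k < j := by omega
            exact absurd rfl (hjmin k hkj)
        right
        refine ⟨((j : Int), s0[j]), ?_, by simpa using hjv, by simpa using hjlt⟩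
        have : ((j : Int), s0[j]) ∈ PySem.List.enumerate s0 0 :=
          (PySem.List.mem_enumerate_iff s0 0 _).mpr ⟨j, hjlen, by simp⟩
        exact ((PySem.List.sorted_perm _ _ _).mem_iff).mpr this
    have hbridge := fold_bridge s0 (PySem.List.sorted (PySem.List.enumerate s0 0) (fun p => p.2) true)
      (bk * 1000 + bg) (List.replicate s0.length 0) (q_pairwise_PP s0) hz0 hu hm
    rw [hA, hB, sorted_values_eq s0, hbridge]
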